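-- pv_equiv track=rewrite | github.com/Ayush37/LROT | backend/functions/get_6g_status.py | get_table_by_name_or_bpf
-- ===== SOURCE A (Python) =====
-- def get_table_by_name_or_bpf(config, table_identifier):
--     """Get table details by name or BPF ID."""
--     if not table_identifier:
--         return None
--
--     # Try to find by name (case-insensitive partial match)
--     for table in config['tables']:
--         if table_identifier.lower() in table['name'].lower():
--             return table
--
--     # Try to find by BPF ID
--     for table in config['tables']:
--         if table_identifier == table['bpf_id']:
--             return table
--
--     return None
-- ===== SOURCE B (Python) =====
-- def get_table_by_name_or_bpf(config, table_identifier):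
--     """Get table details by name or BPF ID (single pass with a pending BPF candidate)."""
--     if not table_identifier:
--         return None
--     ident_lower = table_identifier.lower()
--     bpf_candidate = None
--     for table in config['tables']:
--         if ident_lower in table['name'].lower():
--             return table
--         if bpf_candidate is None and table_identifier == table.get('bpf_id'):
--             bpf_candidate = table
--     return bpf_candidate
-- ===== Notes on version B (the rewrite author's own statement) =====
-- stated objective: alternative
-- what changed: Replaces A's two separate scans of config['tables'] (name pass, then BPF pass) by a single pass that returns immediately on a name match and records the first BPF match (read with dict.get) as a pending candidate returned after the loop.
import Mathlib
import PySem

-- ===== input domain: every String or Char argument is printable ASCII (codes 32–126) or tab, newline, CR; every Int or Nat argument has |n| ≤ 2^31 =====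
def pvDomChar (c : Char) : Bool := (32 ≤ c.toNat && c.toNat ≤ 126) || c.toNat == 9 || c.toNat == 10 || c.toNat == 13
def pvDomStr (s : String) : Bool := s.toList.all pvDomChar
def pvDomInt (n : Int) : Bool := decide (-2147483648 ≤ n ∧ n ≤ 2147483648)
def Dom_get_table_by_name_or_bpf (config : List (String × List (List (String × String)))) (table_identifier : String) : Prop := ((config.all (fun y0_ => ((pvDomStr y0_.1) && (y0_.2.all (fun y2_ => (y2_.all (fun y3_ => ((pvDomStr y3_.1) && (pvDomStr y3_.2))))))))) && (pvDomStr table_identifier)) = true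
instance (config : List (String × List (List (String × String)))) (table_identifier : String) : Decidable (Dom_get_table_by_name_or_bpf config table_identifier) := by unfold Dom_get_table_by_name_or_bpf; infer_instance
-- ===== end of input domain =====

-- B collapses A's two scans of config['tables'] into one pass that returns a name match
-- immediately and keeps the first BPF match (read with dict.get) as a pending candidate
-- (objective: alternative).


-- ===== PORT A =====
-- a dict is an association list; table['k'] with a missing key is a KeyError in Python
def pvGetKey (t : List (String × String)) (k : String) : Option String :=
  PySem.Dict.get? (PySem.Dict.mk t) k

-- first loop of A: find by case-insensitive partial name match
def pvFindByName (tables : List (List (String × String))) (table_identifier : String) :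
    Option (List (String × String)) :=
  match tables with
  | [] => none
  | t :: rest =>
    match pvGetKey t "name" with
    | some n =>
      if PySem.Str.isIn (PySem.Str.lower table_identifier) (PySem.Str.lower n) then some t
      else pvFindByName rest table_identifier
    | none => pvFindByName rest table_identifier    -- KeyError in Python; outside Pre_

-- second loop of A: find by exact BPF id (missing 'bpf_id' is a KeyError, outside Pre_)
def pvFindByBpf (tables : List (List (String × String))) (table_identifier : String) :
    Option (List (String × String)) :=
  match tables with
  | [] => none
  | t :: rest =>
    if pvGetKey t "bpf_id" = some table_identifier then some t
    else pvFindByBpf rest table_identifier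

def get_table_by_name_or_bpf (config : List (String × List (List (String × String)))) (table_identifier : String) : Option (List (String × String)) :=
  if table_identifier = "" then none
  else
    match PySem.Dict.get? (PySem.Dict.mk config) "tables" with
    | none => none                                   -- KeyError in Python; outside Pre_
    | some tables =>
      match pvFindByName tables table_identifier with
      | some t => some t
      | none => pvFindByBpf tables table_identifier

-- ===== PORT B =====
-- single pass: return a name match at once, remember the first BPF match (table.get('bpf_id'))
def pvScan (tables : List (List (String × String))) (ident_lower : String)
    (table_identifier : String) (bpf_candidate : Option (List (String × String))) :
    Option (List (String × String)) :=
  match tables with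
  | [] => bpf_candidate
  | t :: rest =>
    match pvGetKey t "name" with
    | some n =>
      if PySem.Str.isIn ident_lower (PySem.Str.lower n) then some t
      else
        pvScan rest ident_lower table_identifier
          (if bpf_candidate = none ∧ pvGetKey t "bpf_id" = some table_identifier
           then some t else bpf_candidate)
    | none =>                                        -- KeyError in Python B too; outside Pre_
        pvScan rest ident_lower table_identifier
          (if bpf_candidate = none ∧ pvGetKey t "bpf_id" = some table_identifier
           then some t else bpf_candidate)

def get_table_by_name_or_bpf_alt (config : List (String × List (List (String × String)))) (table_identifier : String) : Option (List (String × String)) :=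
  if table_identifier = "" then none
  else
    match PySem.Dict.get? (PySem.Dict.mk config) "tables" with
    | none => none                                   -- KeyError in Python B too; outside Pre_
    | some tables => pvScan tables (PySem.Str.lower table_identifier) table_identifier none

-- ===== PRECONDITION & SPEC =====
-- does this table's 'name' match the identifier (missing key = no match)?
def pvNameMatch (table_identifier : String) (t : List (String × String)) : Bool :=
  match PySem.Dict.get? (PySem.Dict.mk t) "name" with
  | some n => PySem.Str.isIn (PySem.Str.lower table_identifier) (PySem.Str.lower n)
  | none => false

-- does this table's 'bpf_id' equal the identifier (missing key = no match)?
def pvBpfMatch (table_identifier : String) (t : List (String × String)) : Bool :=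
  PySem.Dict.get? (PySem.Dict.mk t) "bpf_id" == some table_identifier

-- Pre_ excludes exactly the inputs where A raises KeyError: for a nonempty identifier, a
-- config without the 'tables' key, a table lacking 'name' before the first name match, or
-- — when no table's name matches — a table lacking 'bpf_id' before the first BPF match
-- (on these last inputs B, which reads bpf_id with dict.get, returns the first
-- BPF-matching table or None instead of raising).
def Pre_get_table_by_name_or_bpf (config : List (String × List (List (String × String)))) (table_identifier : String) : Prop :=
  table_identifier = "" ∨
    ((PySem.Dict.get? (PySem.Dict.mk config) "tables").isSome = true ∧
      (∀ t ∈ ((PySem.Dict.get? (PySem.Dict.mk config) "tables").getD []).takeWhile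
          (fun t => !pvNameMatch table_identifier t),
        (PySem.Dict.get? (PySem.Dict.mk t) "name").isSome = true) ∧
      (((PySem.Dict.get? (PySem.Dict.mk config) "tables").getD []).all
          (fun t => !pvNameMatch table_identifier t) = true →
        ∀ t ∈ ((PySem.Dict.get? (PySem.Dict.mk config) "tables").getD []).takeWhile
            (fun t => !pvBpfMatch table_identifier t),
          (PySem.Dict.get? (PySem.Dict.mk t) "bpf_id").isSome = true))
instance (config : List (String × List (List (String × String)))) (table_identifier : String) : Decidable (Pre_get_table_by_name_or_bpf config table_identifier) := by unfold Pre_get_table_by_name_or_bpf; infer_instance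

def pvWitness_get_table_by_name_or_bpf : (List (String × List (List (String × String)))) × String :=
  ([("tables", [[("name", "zz"), ("bpf_id", "7")], [("name", "ab"), ("bpf_id", "1")]])], "ab")

def Spec_get_table_by_name_or_bpf (config : List (String × List (List (String × String)))) (table_identifier : String) (out : Option (List (String × String))) : Prop := out = get_table_by_name_or_bpf_alt config table_identifier
instance (config : List (String × List (List (String × String)))) (table_identifier : String) (out : Option (List (String × String))) : Decidable (Spec_get_table_by_name_or_bpf config table_identifier out) := by unfold Spec_get_table_by_name_or_bpf; infer_instance

-- ===== CLAIM (what is proved, stated in full; the proofs are below) =====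
def Claim_equal_get_table_by_name_or_bpf : Prop := ∀ (config : List (String × List (List (String × String)))) (table_identifier : String), Dom_get_table_by_name_or_bpf config table_identifier → Pre_get_table_by_name_or_bpf config table_identifier → Spec_get_table_by_name_or_bpf config table_identifier (get_table_by_name_or_bpf config table_identifier)

-- ===== LEMMAS AND PROOFS =====

-- loop invariant for B's single pass: it equals "name match, else candidate, else BPF match"
theorem pvScan_eq (tables : List (List (String × String))) (table_identifier : String)
    (cand : Option (List (String × String))) :
    pvScan tables (PySem.Str.lower table_identifier) table_identifier cand =
      match pvFindByName tables table_identifier with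
      | some t => some t
      | none =>
        match cand with
        | some c => some c
        | none => pvFindByBpf tables table_identifier := by
  induction tables generalizing cand with
  | nil => cases cand <;> simp [pvScan, pvFindByName, pvFindByBpf]
  | cons t rest ih =>
    simp only [pvScan, pvFindByName, pvFindByBpf]
    cases hn : pvGetKey t "name" with
    | some n =>
      by_cases hm : PySem.Chars.isIn (PySem.Chars.lower table_identifier.toList)
          (PySem.Chars.lower n.toList) = true
      · simp [hm]
      · simp only [ih]
        cases cand with
        | some c => simp [hm]
        | none =>
          by_cases hb : pvGetKey t "bpf_id" = some table_identifier <;> simp [hb, hm]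
    | none =>
      rw [ih]
      cases cand with
      | some c => simp
      | none =>
        by_cases hb : pvGetKey t "bpf_id" = some table_identifier <;> simp [hb]

-- ===== VERDICT (by name: the statements are the Claim_ definitions above) =====
theorem get_table_by_name_or_bpf_spec : Claim_equal_get_table_by_name_or_bpf := by
  intro config table_identifier _ _
  unfold Spec_get_table_by_name_or_bpf
  unfold get_table_by_name_or_bpf get_table_by_name_or_bpf_alt
  by_cases he : table_identifier = ""
  · simp [he]
  · simp only [he, if_false]
    cases PySem.Dict.get? (PySem.Dict.mk config) "tables" with
    | none => rfl
    | some tables => dsimp only; rw [pvScan_eq]
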